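-- pv_equiv track=rewrite | github.com/lamalab-org/PolyMetriX | descriptors.py | group_side_chain_and_backbone_bridges
-- ===== SOURCE A (Python) =====
-- def group_side_chain_and_backbone_bridges(side_chain_bridges, backbone_bridges):
--     """
--     Groups the side chain bridges and backbone bridges into separate tuples of tuples,
--     where each inner tuple represents a continuous side chain or backbone.
--     Also returns the lengths of these side chains and backbones as separate lists.
--
--     Args:
--         side_chain_bridges (list): A list of tuples representing the side chain bridges.
--         backbone_bridges (list): A list of tuples representing the backbone bridges.
--
--     Returns:
--         tuple: A tuple of tuples, where each inner tuple represents a continuous side chain.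
--         list: A list containing the lengths of the side chains.
--         tuple: A tuple of tuples, where each inner tuple represents a continuous backbone.
--         list: A list containing the lengths of the backbones.
--     """
--     if not side_chain_bridges:
--         side_chain_bridges = ()
--         side_chain_lengths = []
--     else:
--         grouped_side_chains = []
--         side_chain_lengths = []
--         current_side_chain = []
--
--         for bridge in side_chain_bridges:
--             if not current_side_chain or bridge[0] in current_side_chain[-1] or bridge[1] in current_side_chain[-1]:
--                 current_side_chain.append(bridge)
--             else:
--                 grouped_side_chains.append(tuple(current_side_chain))
--                 side_chain_lengths.append(len(current_side_chain))
--                 current_side_chain = [bridge]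
--
--         if current_side_chain:
--             grouped_side_chains.append(tuple(current_side_chain))
--             side_chain_lengths.append(len(current_side_chain))
--
--         side_chain_bridges = tuple(grouped_side_chains)
--
--     if not backbone_bridges:
--         backbone_bridges = ()
--         backbone_lengths = []
--     else:
--         grouped_backbones = []
--         backbone_lengths = []
--         current_backbone = []
--
--         for bridge in backbone_bridges:
--             if not current_backbone or bridge[0] in current_backbone[-1] or bridge[1] in current_backbone[-1]:
--                 current_backbone.append(bridge)
--             else:
--                 grouped_backbones.append(tuple(current_backbone))
--                 backbone_lengths.append(len(current_backbone))
--                 current_backbone = [bridge]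
--
--         if current_backbone:
--             grouped_backbones.append(tuple(current_backbone))
--             backbone_lengths.append(len(current_backbone))
--
--         backbone_bridges = tuple(grouped_backbones)
--
--     return side_chain_bridges, side_chain_lengths, backbone_bridges, backbone_lengths
-- ===== SOURCE B (Python) =====
-- def _group(bridges):
--     # Build the grouping back-to-front: walk the bridges in reverse and either
--     # prepend the bridge onto the front group (if the front group's first bridge
--     # shares a coordinate with it) or open a new group in front of the others.
--     groups = []
--     for bridge in reversed(bridges):
--         if groups and (groups[0][0][0] in bridge or groups[0][0][1] in bridge):
--             groups[0] = (bridge,) + groups[0]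
--         else:
--             groups.insert(0, (bridge,))
--     return tuple(groups), [len(g) for g in groups]
--
--
-- def group_side_chain_and_backbone_bridges(side_chain_bridges, backbone_bridges):
--     side_groups, side_lengths = _group(side_chain_bridges)
--     backbone_groups, backbone_lengths = _group(backbone_bridges)
--     return side_groups, side_lengths, backbone_groups, backbone_lengths
-- ===== Notes on version B (the rewrite author's own statement) =====
-- stated objective: alternative
-- what changed: B replaces A's forward loop with a current-buffer and end-of-loop flush by a single reverse pass that builds the grouping back-to-front, prepending each bridge into the front group or opening a new group, then derives the lengths by mapping len over the finished groups.
import Mathlib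
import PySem

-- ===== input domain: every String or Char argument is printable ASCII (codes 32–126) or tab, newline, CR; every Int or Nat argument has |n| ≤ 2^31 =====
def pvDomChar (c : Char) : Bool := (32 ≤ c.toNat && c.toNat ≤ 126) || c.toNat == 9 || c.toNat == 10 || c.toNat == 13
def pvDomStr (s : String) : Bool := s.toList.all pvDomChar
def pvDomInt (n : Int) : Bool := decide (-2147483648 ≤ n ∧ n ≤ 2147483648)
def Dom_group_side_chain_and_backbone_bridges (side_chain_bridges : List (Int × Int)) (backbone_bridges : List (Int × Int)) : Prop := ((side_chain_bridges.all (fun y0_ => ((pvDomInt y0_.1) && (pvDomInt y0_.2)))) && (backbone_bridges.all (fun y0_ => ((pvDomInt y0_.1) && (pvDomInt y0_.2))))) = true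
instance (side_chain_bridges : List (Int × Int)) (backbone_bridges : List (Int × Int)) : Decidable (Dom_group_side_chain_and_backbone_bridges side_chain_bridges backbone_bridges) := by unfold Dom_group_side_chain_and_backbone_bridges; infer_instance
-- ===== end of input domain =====

-- B rebuilds the grouping back-to-front in one reverse pass with no current-buffer/flush
-- bookkeeping (objective: alternative decomposition, same result).

-- ===== PORT A =====
-- loop body of A's grouping loop: state = (grouped, lengths, current)
def stepA (st : List (List (Int × Int)) × List Int × List (Int × Int)) (bridge : Int × Int) :
    List (List (Int × Int)) × List Int × List (Int × Int) :=
  match st with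
  | (grouped, lengths, current) =>
    match current with
    | [] => (grouped, lengths, [bridge])       -- `not current` short-circuits: append to empty current
    | c :: cs =>
      let last := (c :: cs).getLast (by simp)  -- current[-1]
      if bridge.1 = last.1 ∨ bridge.1 = last.2 ∨ bridge.2 = last.1 ∨ bridge.2 = last.2 then
        (grouped, lengths, (c :: cs) ++ [bridge])
      else
        (grouped ++ [c :: cs], lengths ++ [((c :: cs).length : Int)], [bridge])

def group_side_chain_and_backbone_bridges (side_chain_bridges : List (Int × Int)) (backbone_bridges : List (Int × Int)) : (List (List (Int × Int))) × List Int × (List (List (Int × Int))) × List Int :=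
  let side :=
    if side_chain_bridges = [] then (([] : List (List (Int × Int))), ([] : List Int))
    else
      let st := side_chain_bridges.foldl stepA ([], [], [])
      if st.2.2 = [] then (st.1, st.2.1)
      else (st.1 ++ [st.2.2], st.2.1 ++ [(st.2.2.length : Int)])
  let back :=
    if backbone_bridges = [] then (([] : List (List (Int × Int))), ([] : List Int))
    else
      let st := backbone_bridges.foldl stepA ([], [], [])
      if st.2.2 = [] then (st.1, st.2.1)
      else (st.1 ++ [st.2.2], st.2.1 ++ [(st.2.2.length : Int)])
  (side.1, side.2, back.1, back.2)

-- ===== PORT B =====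
-- one reverse-iteration step of B's loop: prepend `bridge` into the front group or open a new one
def gbStep (bridge : Int × Int) (groups : List (List (Int × Int))) : List (List (Int × Int)) :=
  match groups with
  | [] => [[bridge]]
  | g :: rest =>
    match g with
    | [] => [bridge] :: rest   -- unreachable: groups never contains an empty group
    | z :: t =>
      if z.1 = bridge.1 ∨ z.1 = bridge.2 ∨ z.2 = bridge.1 ∨ z.2 = bridge.2 then
        (bridge :: z :: t) :: rest
      else
        [bridge] :: (z :: t) :: rest

def groupB (bridges : List (Int × Int)) : List (List (Int × Int)) × List Int :=
  let groups := bridges.foldr gbStep []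
  (groups, groups.map (fun g => (g.length : Int)))

def group_side_chain_and_backbone_bridges_alt (side_chain_bridges : List (Int × Int)) (backbone_bridges : List (Int × Int)) : (List (List (Int × Int))) × List Int × (List (List (Int × Int))) × List Int :=
  ((groupB side_chain_bridges).1, (groupB side_chain_bridges).2,
   (groupB backbone_bridges).1, (groupB backbone_bridges).2)

-- ===== PRECONDITION & SPEC =====
def Spec_group_side_chain_and_backbone_bridges (side_chain_bridges : List (Int × Int)) (backbone_bridges : List (Int × Int)) (out : (List (List (Int × Int))) × List Int × (List (List (Int × Int))) × List Int) : Prop := out = group_side_chain_and_backbone_bridges_alt side_chain_bridges backbone_bridges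
instance (side_chain_bridges : List (Int × Int)) (backbone_bridges : List (Int × Int)) (out : (List (List (Int × Int))) × List Int × (List (List (Int × Int))) × List Int) : Decidable (Spec_group_side_chain_and_backbone_bridges side_chain_bridges backbone_bridges out) := by unfold Spec_group_side_chain_and_backbone_bridges; infer_instance

-- ===== CLAIM (what is proved, stated in full; the proofs are below) =====
def Claim_equal_group_side_chain_and_backbone_bridges : Prop := ∀ (side_chain_bridges : List (Int × Int)) (backbone_bridges : List (Int × Int)), Dom_group_side_chain_and_backbone_bridges side_chain_bridges backbone_bridges → Spec_group_side_chain_and_backbone_bridges side_chain_bridges backbone_bridges (group_side_chain_and_backbone_bridges side_chain_bridges backbone_bridges)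

-- ===== LEMMAS AND PROOFS =====

-- forward grouping with a pending (nonempty) current group `cur ++ [y]`
def Hgo (cur : List (Int × Int)) (y : Int × Int) (l : List (Int × Int)) : List (List (Int × Int)) :=
  match l with
  | [] => [cur ++ [y]]
  | x :: xs =>
    if x.1 = y.1 ∨ x.1 = y.2 ∨ x.2 = y.1 ∨ x.2 = y.2 then Hgo (cur ++ [y]) x xs
    else (cur ++ [y]) :: Hgo [] x xs

-- merging a pending group (ending in y) with an already-built grouping
def mergeB (cur : List (Int × Int)) (y : Int × Int) (gs : List (List (Int × Int))) : List (List (Int × Int)) :=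
  match gs with
  | [] => [cur ++ [y]]
  | [] :: rest => (cur ++ [y]) :: [] :: rest
  | (z :: g) :: rest =>
    if z.1 = y.1 ∨ z.1 = y.2 ∨ z.2 = y.1 ∨ z.2 = y.2 then (cur ++ [y] ++ z :: g) :: rest
    else (cur ++ [y]) :: (z :: g) :: rest

-- A's post-loop flush, as a function of the loop state (proof helper)
def flushA (st : List (List (Int × Int)) × List Int × List (Int × Int)) :
    List (List (Int × Int)) × List Int :=
  if st.2.2 = [] then (st.1, st.2.1)
  else (st.1 ++ [st.2.2], st.2.1 ++ [(st.2.2.length : Int)])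

lemma G_shape (l : List (Int × Int)) :
    l.foldr gbStep [] = [] ∨ ∃ z g gs, l.foldr gbStep [] = (z :: g) :: gs := by
  induction l with
  | nil => exact Or.inl rfl
  | cons x xs ih =>
    right
    rcases ih with h | ⟨z, g, gs, h⟩ <;> simp only [List.foldr_cons, h, gbStep]
    · exact ⟨x, [], [], rfl⟩
    · split_ifs
      · exact ⟨x, z :: g, gs, rfl⟩
      · exact ⟨x, [], (z :: g) :: gs, rfl⟩

lemma Hgo_merge (l : List (Int × Int)) : ∀ (cur : List (Int × Int)) (y : Int × Int),
    Hgo cur y l = mergeB cur y (l.foldr gbStep []) := by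
  induction l with
  | nil => intro cur y; simp [Hgo, mergeB]
  | cons x xs ih =>
    intro cur y
    rcases G_shape xs with h | ⟨z, g, gs, h⟩ <;>
      simp only [Hgo, List.foldr_cons, h, gbStep, ih, mergeB] <;> split_ifs <;>
      simp_all [mergeB, List.append_assoc]

lemma stepA_concat (gr : List (List (Int × Int))) (le : List Int)
    (cur : List (Int × Int)) (y x : Int × Int) :
    stepA (gr, le, cur ++ [y]) x =
      if x.1 = y.1 ∨ x.1 = y.2 ∨ x.2 = y.1 ∨ x.2 = y.2 then (gr, le, (cur ++ [y]) ++ [x])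
      else (gr ++ [cur ++ [y]], le ++ [((cur ++ [y]).length : Int)], [x]) := by
  rcases cur with _ | ⟨c, cs⟩ <;> simp [stepA]

lemma loop_flush (l : List (Int × Int)) : ∀ (gr : List (List (Int × Int))) (le : List Int)
    (cur : List (Int × Int)) (y : Int × Int),
    flushA (l.foldl stepA (gr, le, cur ++ [y]))
    = (gr ++ Hgo cur y l, le ++ (Hgo cur y l).map (fun g => (g.length : Int))) := by
  induction l with
  | nil => intro gr le cur y; simp [flushA, Hgo]
  | cons x xs ih =>
    intro gr le cur y
    by_cases h : x.1 = y.1 ∨ x.1 = y.2 ∨ x.2 = y.1 ∨ x.2 = y.2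
    · simp only [List.foldl_cons, stepA_concat, if_pos h, Hgo]
      exact ih gr le (cur ++ [y]) x
    · simp only [List.foldl_cons, stepA_concat, if_neg h, Hgo]
      have := ih (gr ++ [cur ++ [y]]) (le ++ [((cur ++ [y]).length : Int)]) [] x
      simp only [List.nil_append] at this
      simpa [List.append_assoc] using this

lemma side_eq (l : List (Int × Int)) :
    (if l = [] then (([] : List (List (Int × Int))), ([] : List Int))
     else
       let st := l.foldl stepA ([], [], []);
       if st.2.2 = [] then (st.1, st.2.1)
       else (st.1 ++ [st.2.2], st.2.1 ++ [(st.2.2.length : Int)]))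
    = groupB l := by
  rcases l with _ | ⟨x, xs⟩
  · simp [groupB]
  · have h1 : (x :: xs).foldl stepA ([], [], []) = xs.foldl stepA ([], [], [] ++ [x]) := by
      simp [stepA]
    have h2 := loop_flush xs ([]) ([]) ([]) x
    simp only [List.nil_append] at h2
    have h3 : Hgo [] x xs = (x :: xs).foldr gbStep [] := by
      rw [Hgo_merge]
      rcases G_shape xs with h | ⟨z, g, gs, h⟩
      · simp [h, mergeB, gbStep]
      · simp only [List.foldr_cons, h, mergeB, gbStep]
        split_ifs <;> simp
    simp only [if_neg (List.cons_ne_nil x xs), h1, List.nil_append]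
    simp only [flushA] at h2
    simp [h2, h3, groupB]

-- ===== VERDICT (by name: the statement is the Claim_ definition above) =====
theorem group_side_chain_and_backbone_bridges_spec : Claim_equal_group_side_chain_and_backbone_bridges := by
  intro s b _
  show _ = _
  simp only [group_side_chain_and_backbone_bridges, group_side_chain_and_backbone_bridges_alt,
    side_eq]
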